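-- pv_equiv track=rewrite | github.com/qeedquan/challenges | codewars/simple-fun-#21-number-of-clans.py | clans
-- ===== SOURCE A (Python) =====
-- def clans(d, k):
--     r = []
--     for i in range(1, k + 1):
--         p = []
--         for j in d:
--             if i%j == 0:
--                 p.append(j)
--
--         if p not in r:
--             r.append(p)
--
--     return len(r)
-- ===== SOURCE B (Python) =====
-- def clans(d, k):
--     pats = [[] for _ in range(k + 1)]
--     for j in d:
--         s = abs(j)
--         for m in range(s, k + 1, s):
--             pats[m].append(j)
--     return len({tuple(p) for p in pats[1:]})
-- ===== Notes on version B (the rewrite author's own statement) =====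
-- stated objective: faster
-- what changed: B builds each i's divisor-pattern by sieving multiples of |j| for each divisor j (instead of testing every divisor against every i) and counts distinct patterns with a hash set of tuples instead of A's linear-scan membership list.
-- outside the precondition, e.g. on clans([0], 0): A returns 0, B raises ValueError
import Mathlib
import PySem

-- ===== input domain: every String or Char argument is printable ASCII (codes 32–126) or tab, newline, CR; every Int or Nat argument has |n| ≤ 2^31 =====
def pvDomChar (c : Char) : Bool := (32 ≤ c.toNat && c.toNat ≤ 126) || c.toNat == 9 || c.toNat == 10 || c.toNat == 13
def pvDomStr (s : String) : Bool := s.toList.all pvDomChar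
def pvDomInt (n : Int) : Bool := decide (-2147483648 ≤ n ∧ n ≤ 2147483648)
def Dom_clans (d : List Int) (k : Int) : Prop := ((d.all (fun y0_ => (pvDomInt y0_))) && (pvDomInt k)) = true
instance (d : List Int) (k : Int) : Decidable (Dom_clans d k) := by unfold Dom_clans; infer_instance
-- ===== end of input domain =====

-- B replaces A's per-i divisibility tests by a sieve that marks the multiples of each divisor,
-- and A's linear-scan dedup list by a set; measurably faster.

-- ===== PORT A =====
def clans (d : List Int) (k : Int) : Int :=
  let r := (PySem.List.pyRange 1 (k+1)).foldl (fun r i =>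
    let p := d.foldl (fun p j => if PySem.Int.mod i j = 0 then p ++ [j] else p) ([] : List Int)
    if p ∉ r then r ++ [p] else r) ([] : List (List Int))
  PySem.List.len r

-- ===== PORT B =====
-- The Python list-of-lists pats is ported as Array (List Int) (O(1) update, like Python's
-- mutable list); pats[m].append(j) is P.setIfInBounds m.toNat (P.getD m.toNat [] ++ [j]) —
-- exact, since every index m the sieve touches is nonneg and in range under Pre_.
def clans_alt (d : List Int) (k : Int) : Int :=
  let pats0 : Array (List Int) := ((PySem.List.pyRange 0 (k+1)).map (fun _ => ([] : List Int))).toArray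
  let pats := d.foldl (fun P j =>
    (PySem.List.pyRange |j| (k+1) |j|).foldl
      (fun P m => P.setIfInBounds m.toNat (P.getD m.toNat [] ++ [j])) P) pats0
  PySem.List.len (PySem.Set.ofList (PySem.List.slice pats.toList (some 1) none))

-- ===== PRECONDITION & SPEC =====
-- Pre_ excludes lists containing 0: there A raises ZeroDivisionError whenever k ≥ 1, and for
-- k < 1 A returns 0 without ever reading d while B's sieve raises ValueError (range step 0).
def Pre_clans (d : List Int) (k : Int) : Prop := (0 : Int) ∉ d
instance (d : List Int) (k : Int) : Decidable (Pre_clans d k) := by unfold Pre_clans; infer_instance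
def pvWitness_clans : List Int × Int := ([2, 3], 6)

def Spec_clans (d : List Int) (k : Int) (out : Int) : Prop := out = clans_alt d k
instance (d : List Int) (k : Int) (out : Int) : Decidable (Spec_clans d k out) := by unfold Spec_clans; infer_instance

-- ===== CLAIM (what is proved, stated in full; the proofs are below) =====
def Claim_equal_clans : Prop := ∀ (d : List Int) (k : Int), Dom_clans d k → Pre_clans d k → Spec_clans d k (clans d k)

-- ===== LEMMAS AND PROOFS =====

-- the pattern both programs compute for i, as a filter
def pvPat (d : List Int) (i : Int) : List Int := d.filter (fun j => decide (j ∣ i))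

-- the inner marking loop of one divisor, as a named fold
def pvMark (j : Int) (P : Array (List Int)) (L : List Int) : Array (List Int) :=
  L.foldl (fun P m => P.setIfInBounds m.toNat (P.getD m.toNat [] ++ [j])) P

lemma pvMark_size (j : Int) (L : List Int) (P : Array (List Int)) :
    (pvMark j P L).size = P.size := by
  induction L generalizing P with
  | nil => rfl
  | cons m L ih =>
      rw [show pvMark j P (m :: L)
            = pvMark j (P.setIfInBounds m.toNat (P.getD m.toNat [] ++ [j])) L from rfl,
          ih, Array.size_setIfInBounds]

-- getD after setIfInBounds at an in-range index
lemma pvGetD_set {α : Type} (P : Array α) (n i : ℕ) (v d : α) (h : n < P.size) :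
    (P.setIfInBounds n v).getD i d = if i = n then v else P.getD i d := by
  rw [Array.getD_eq_getD_getElem?, Array.getD_eq_getD_getElem?, Array.getElem?_setIfInBounds]
  by_cases h' : i = n
  · simp [h', h]
  · simp [h', Ne.symm h']

lemma pvMark_getD (j : Int) (L : List Int) (P : Array (List Int))
    (hnd : L.Nodup) (hb : ∀ m ∈ L, 0 ≤ m ∧ m.toNat < P.size) (i : ℕ) :
    (pvMark j P L).getD i [] =
      P.getD i [] ++ (if (i : Int) ∈ L then [j] else []) := by
  induction L generalizing P with
  | nil => simp [pvMark]
  | cons m L ih =>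
      have hm := hb m (by simp)
      have hrest : ∀ x ∈ L, 0 ≤ x ∧ x.toNat < (P.setIfInBounds m.toNat (P.getD m.toNat [] ++ [j])).size := by
        intro x hx; rw [Array.size_setIfInBounds]; exact hb x (by simp [hx])
      rw [show pvMark j P (m :: L)
            = pvMark j (P.setIfInBounds m.toNat (P.getD m.toNat [] ++ [j])) L from rfl,
          ih _ hnd.of_cons hrest, pvGetD_set P m.toNat i _ [] hm.2]
      by_cases him : i = m.toNat
      · have hi' : (i : Int) = m := by omega
        have hil : (i : Int) ∉ L := by rw [hi']; exact (List.nodup_cons.mp hnd).1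
        rw [if_pos him, if_neg hil, if_pos (by rw [hi']; exact List.mem_cons_self), him, List.append_nil]
      · have hi' : (i : Int) ≠ m := by omega
        simp [him, hi']

-- membership in the stride range is divisibility, for 1 ≤ i < k+1 and j ≠ 0
lemma pvMem_stride (j i k : Int) (hj : j ≠ 0) (h1 : 1 ≤ i) (h2 : i < k + 1) :
    i ∈ PySem.List.pyRange |j| (k+1) |j| ↔ j ∣ i := by
  have hs : 0 < |j| := abs_pos.mpr hj
  rw [PySem.List.mem_pyRange_iff_of_pos hs]
  constructor
  · rintro ⟨-, -, hd⟩
    have hd' : |j| ∣ i := by simpa using dvd_add hd (dvd_refl |j|)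
    exact (abs_dvd j i).mp hd'
  · intro hd
    have hd' : |j| ∣ i := (abs_dvd j i).mpr hd
    exact ⟨Int.le_of_dvd (by omega) hd', h2, dvd_sub hd' dvd_rfl⟩

-- the positive-stride range is duplicate-free
lemma pvNodup_stride (a b s : Int) (hs : 0 < s) : (PySem.List.pyRange a b s).Nodup := by
  rw [PySem.List.pyRange_of_pos a b hs]
  refine List.Nodup.map ?_ List.nodup_range
  intro x y hxy
  have hxy' : (x : Int) = y := by nlinarith [hxy]
  exact_mod_cast hxy'

-- the initial pattern table holds only empty lists
lemma pvPats0_getD (k : Int) (i : ℕ) :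
    (((PySem.List.pyRange 0 (k+1)).map (fun _ => ([] : List Int))).toArray).getD i [] = [] := by
  rw [Array.getD_eq_getD_getElem?]
  rcases lt_or_ge i (((PySem.List.pyRange 0 (k+1)).map (fun _ => ([] : List Int))).toArray).size with h | h
  · rw [Array.getElem?_eq_getElem h, List.getElem_toArray, List.getElem_map]; rfl
  · rw [Array.getElem?_eq_none h]; rfl

-- the whole sieve preserves the table size
lemma pvSieve_size (k : Int) (d : List Int) (P : Array (List Int)) :
    (d.foldl (fun P j =>
        (PySem.List.pyRange |j| (k+1) |j|).foldl
          (fun P m => P.setIfInBounds m.toNat (P.getD m.toNat [] ++ [j])) P) P).size = P.size := by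
  induction d generalizing P with
  | nil => rfl
  | cons j d ih =>
      rw [List.foldl_cons, ih, show ((PySem.List.pyRange |j| (k+1) |j|).foldl
          (fun P m => P.setIfInBounds m.toNat (P.getD m.toNat [] ++ [j])) P)
          = pvMark j P (PySem.List.pyRange |j| (k+1) |j|) from rfl, pvMark_size]

-- one full pass of the sieve over all divisors
lemma pvSieve_getD (k : Int) (d : List Int) (P : Array (List Int))
    (hz : ∀ j ∈ d, j ≠ 0) (hsize : P.size = (k+1).toNat) (i : ℕ)
    (h1 : 1 ≤ (i : Int)) (h2 : (i : Int) < k + 1) :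
    (d.foldl (fun P j =>
        (PySem.List.pyRange |j| (k+1) |j|).foldl
          (fun P m => P.setIfInBounds m.toNat (P.getD m.toNat [] ++ [j])) P) P).getD i [] =
      P.getD i [] ++ pvPat d (i : Int) := by
  induction d generalizing P with
  | nil => simp [pvPat]
  | cons j d ih =>
      have hj : j ≠ 0 := hz j (by simp)
      have hs : 0 < |j| := abs_pos.mpr hj
      rw [List.foldl_cons]
      rw [show ((PySem.List.pyRange |j| (k+1) |j|).foldl
          (fun P m => P.setIfInBounds m.toNat (P.getD m.toNat [] ++ [j])) P)
          = pvMark j P (PySem.List.pyRange |j| (k+1) |j|) from rfl]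
      rw [ih _ (fun x hx => hz x (by simp [hx])) (by rw [pvMark_size, hsize])]
      rw [pvMark_getD j _ P (pvNodup_stride _ _ _ hs) ?bounds i]
      case bounds =>
        intro m hm
        rw [PySem.List.mem_pyRange_iff_of_pos hs] at hm
        exact ⟨by omega, by omega⟩
      simp only [pvMem_stride j (i : Int) k hj h1 h2]
      simp only [pvPat, List.filter_cons]
      by_cases hd : j ∣ (i : Int) <;> simp [hd, List.append_assoc]

-- A in closed form: dedup (as a set) of the list of patterns
lemma pvClansA (d : List Int) (k : Int) :
    clans d k = PySem.List.len (PySem.Set.ofList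
      ((PySem.List.pyRange 1 (k+1)).map (fun i => d.filter (fun j => decide (PySem.Int.mod i j = 0))))) := by
  simp only [clans, PySem.List.foldl_append_ite_eq_filter, List.nil_append,
    PySem.Set.ofList_eq_foldl, List.foldl_map]
  refine congrArg PySem.List.len (PySem.List.foldl_congr_mem _ _ _ _ ?_)
  intro acc i _
  simp only [PySem.Set.add]
  by_cases h : (d.filter (fun j => decide (PySem.Int.mod i j = 0))) ∈ acc <;> simp [h]

-- B in closed form: the sieved patterns list is the same list of patterns
lemma pvClansB (d : List Int) (k : Int) (hz : ∀ j ∈ d, j ≠ 0) :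
    clans_alt d k = PySem.List.len (PySem.Set.ofList
      ((PySem.List.pyRange 1 (k+1)).map (fun i => pvPat d i))) := by
  simp only [clans_alt, PySem.List.slice_from_one]
  refine congrArg (fun l => PySem.List.len (PySem.Set.ofList l)) ?_
  have hsz : ∀ P0 : Array (List Int), P0.size = (k+1).toNat →
      (List.foldl (fun P j =>
        (PySem.List.pyRange |j| (k+1) |j|).foldl
          (fun P m => P.setIfInBounds m.toNat (P.getD m.toNat [] ++ [j])) P) P0 d).size = (k+1).toNat := by
    intro P0 h0; rw [pvSieve_size]; exact h0
  have h0 : (((PySem.List.pyRange 0 (k+1)).map (fun _ => ([] : List Int))).toArray).size = (k+1).toNat := by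
    rw [List.size_toArray, List.length_map, PySem.List.length_pyRange_one]; omega
  apply List.ext_getElem
  · rw [List.length_tail, Array.length_toList, hsz _ h0, List.length_map,
        PySem.List.length_pyRange_one]
    omega
  · intro t ht1 ht2
    rw [List.getElem_tail, List.getElem_map, PySem.List.getElem_pyRange_one]
    have hb : t + 1 < (List.foldl (fun P j =>
        (PySem.List.pyRange |j| (k+1) |j|).foldl
          (fun P m => P.setIfInBounds m.toNat (P.getD m.toNat [] ++ [j])) P)
        (((PySem.List.pyRange 0 (k+1)).map (fun _ => ([] : List Int))).toArray) d).size := by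
      rw [hsz _ h0]
      rw [List.length_tail, Array.length_toList, hsz _ h0] at ht1
      omega
    rw [Array.getElem_toList]
    have hgetD : ∀ (P : Array (List Int)) (n : ℕ) (h : n < P.size), P[n] = P.getD n [] := by
      intro P n h
      rw [Array.getD_eq_getD_getElem?, Array.getElem?_eq_getElem h]; rfl
    rw [hgetD _ _ hb]
    have ht2' : (t : Int) + 1 < k + 1 := by
      rw [List.length_map, PySem.List.length_pyRange_one] at ht2
      omega
    have key := pvSieve_getD k d (((PySem.List.pyRange 0 (k+1)).map (fun _ => ([] : List Int))).toArray)
      hz h0 (t + 1) (by omega) (by push_cast; omega)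
    rw [pvPats0_getD, List.nil_append] at key
    rw [key, show (((t + 1 : ℕ)) : Int) = 1 + (t : Int) from by push_cast; ring]

-- the two per-i predicates agree
lemma pvPat_eq (d : List Int) (i : Int) :
    d.filter (fun j => decide (PySem.Int.mod i j = 0)) = pvPat d i := by
  unfold pvPat
  apply List.filter_congr
  intro j _
  simp [PySem.Int.mod_eq_zero_iff_dvd]

-- ===== VERDICT (by name: the statement is the Claim_ definition above) =====
theorem clans_spec : Claim_equal_clans := by
  intro d k _ hpre
  unfold Spec_clans
  rw [pvClansA, pvClansB d k (fun j hj h0 => hpre (h0 ▸ hj))]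
  simp only [pvPat_eq]
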